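-- pv_equiv track=rewrite | github.com/IL2HorusTeam/il2fb-difficulty | setup.py | split_requirements
-- ===== SOURCE A (Python) =====
-- def split_requirements(lines):
--     requirements, dependencies = [], []
--
--     for line in lines:
--         if line.startswith('-e'):
--             dependencies.append(line.split(' ', 1)[1])
--         else:
--             requirements.append(line)
--
--     return requirements, dependencies
-- ===== SOURCE B (Python) =====
-- def split_requirements(lines):
--     def go(chunk):
--         if not chunk:
--             return [], []
--         if len(chunk) == 1:
--             line = chunk[0]
--             if line.startswith('-e'):
--                 return [], [line.split(' ', 1)[1]]
--             return [line], []
--         mid = len(chunk) // 2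
--         r1, d1 = go(chunk[:mid])
--         r2, d2 = go(chunk[mid:])
--         return r1 + r2, d1 + d2
--
--     return go(list(lines))
-- ===== Notes on version B (the rewrite author's own statement) =====
-- stated objective: alternative
-- what changed: Replaces the single left-to-right classify-and-append loop with a divide-and-conquer recursion that splits the list in halves, solves each half independently, and combines the two result pairs by concatenation.
import Mathlib
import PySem

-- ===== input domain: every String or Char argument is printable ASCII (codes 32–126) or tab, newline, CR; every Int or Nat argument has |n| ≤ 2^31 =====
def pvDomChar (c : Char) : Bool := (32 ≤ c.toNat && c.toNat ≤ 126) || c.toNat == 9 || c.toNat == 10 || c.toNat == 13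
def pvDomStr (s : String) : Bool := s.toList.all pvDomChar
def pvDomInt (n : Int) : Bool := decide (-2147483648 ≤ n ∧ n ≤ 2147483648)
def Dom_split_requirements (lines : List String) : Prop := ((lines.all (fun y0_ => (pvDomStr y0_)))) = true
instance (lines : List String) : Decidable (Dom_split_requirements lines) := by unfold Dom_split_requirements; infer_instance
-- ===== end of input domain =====

-- ===== PORT A =====
-- B is a divide-and-conquer recursion on halves instead of A's left-to-right accumulator loop (alternative decomposition, same results).
-- split(' ', 1)[1]: the [1] access raises IndexError when the line has no space; such inputs are excluded by Pre_.
def pvTail (line : String) : String :=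
  PySem.List.pyGetD ((PySem.Str.splitMax? line " " 1).getD []) 1 ""

def split_requirements (lines : List String) : List String × List String :=
  lines.foldl (fun acc line =>
    if PySem.Str.startswith line "-e" then (acc.1, acc.2 ++ [pvTail line])
    else (acc.1 ++ [line], acc.2)) ([], [])

-- ===== PORT B =====
def pvGoB : List String → List String × List String
  | [] => ([], [])
  | [line] =>
      if PySem.Str.startswith line "-e" then ([], [pvTail line]) else ([line], [])
  | x :: y :: rest =>
      let mid := (x :: y :: rest).length / 2
      let p1 := pvGoB ((x :: y :: rest).take mid)
      let p2 := pvGoB ((x :: y :: rest).drop mid)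
      (p1.1 ++ p2.1, p1.2 ++ p2.2)
termination_by l => l.length
decreasing_by
  · simp; omega
  · simp; omega

def split_requirements_alt (lines : List String) : List String × List String :=
  pvGoB lines

-- ===== PRECONDITION & SPEC =====
-- Pre_ excludes exactly the inputs where A (and B) raise IndexError: a line starting with "-e" but containing no space.
def Pre_split_requirements (lines : List String) : Prop :=
  ∀ line ∈ lines, PySem.Str.startswith line "-e" = true → PySem.Str.isIn " " line = true
instance (lines : List String) : Decidable (Pre_split_requirements lines) := by unfold Pre_split_requirements; infer_instance
def pvWitness_split_requirements : List String := ["foo", "-e bar baz"]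
def Spec_split_requirements (lines : List String) (out : List String × List String) : Prop := out = split_requirements_alt lines
instance (lines : List String) (out : List String × List String) : Decidable (Spec_split_requirements lines out) := by unfold Spec_split_requirements; infer_instance

-- ===== CLAIM (what is proved, stated in full; the proofs are below) =====
def Claim_equal_split_requirements : Prop := ∀ (lines : List String), Dom_split_requirements lines → Pre_split_requirements lines → Spec_split_requirements lines (split_requirements lines)

-- ===== LEMMAS AND PROOFS =====
-- A's loop computes the filtered/mapped characterisation.
theorem split_requirements_foldl (p : String → Bool) (t : String → String)
    (lines : List String) (r d : List String) :
    lines.foldl (fun acc line =>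
      if p line then (acc.1, acc.2 ++ [t line])
      else (acc.1 ++ [line], acc.2)) (r, d) =
    (r ++ lines.filter (fun line => !p line),
     d ++ (lines.filter p).map t) := by
  induction lines generalizing r d with
  | nil => simp
  | cons x xs ih =>
    cases h : p x <;> simp [List.foldl_cons, h, ih]

-- B's divide-and-conquer computes the same characterisation.
theorem pvGoB_eq (l : List String) :
    pvGoB l = (l.filter (fun line => !PySem.Str.startswith line "-e"),
      (l.filter (fun line => PySem.Str.startswith line "-e")).map pvTail) := by
  induction l using pvGoB.induct with
  | case1 => simp [pvGoB]
  | case2 line h => simp at h; simp [pvGoB, h]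
  | case3 line h => simp at h; simp [pvGoB, h]
  | case4 x y rest mid ih ih' =>
      have hm : mid = (x :: y :: rest).length / 2 := rfl
      simp only [pvGoB, ← hm]
      rw [ih, ih']
      simp only [Prod.mk.injEq]
      constructor
      · rw [← List.filter_append, List.take_append_drop]
      · rw [← List.map_append, ← List.filter_append, List.take_append_drop]

-- ===== VERDICT (by name: the statement is the Claim_ definition above) =====
theorem split_requirements_spec : Claim_equal_split_requirements := by
  intro lines _ _
  show split_requirements lines = split_requirements_alt lines
  unfold split_requirements split_requirements_alt
  rw [split_requirements_foldl (fun line => PySem.Str.startswith line "-e") pvTail lines [] [],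
    pvGoB_eq]
  simp
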